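-- pv_equiv track=rewrite | github.com/g-s01/data-programming-btp | gautam-results-and-analysis/raw-to-fine-direct/through-lfs/context-window-one/lfs_for_raw_sentence_gpt.py | label_sentence_Product_Clothing
-- ===== SOURCE A (Python) =====
-- ABSTAIN = -1
--
-- Product_Clothing = 24
--
-- def label_sentence_Product_Clothing(tokens):
--     """
--     Labels each token in a sentence as Product_Clothing if it indicates a type of clothing or apparel.
--     Returns ABSTAIN for tokens that do not match the category.
--
--     Args:
--     tokens: list of str - A list of words representing a sentence.
--
--     Returns:
--     list of str - A list of labels for each token.
--     """
--     # Common clothing-related indicators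
--     clothing_indicators = {
--         'shirt', 'jumper', 'skirt', 'trousers', 'bikini', 'sarong', 'garments', 'robe', 'turban',
--         'caps', 'jacket', 'coat', 'dress', 'pants', 'sweater', 'scarf', 'gloves', 'hat', 'suit',
--         'tie', 'gown', 'uniform', 'tunic', 'costume', 'blouse', 'jeans', 'shorts', 'leggings',
--         'hoodie', 'socks', 'shoes', 'boots', 'sandals', 'slippers', 'swimwear', 'sheath', 'tefillin'
--     }
--     product_context = {
--         'wearing', 'dressed', 'donning', 'wore', 'fashion', 'apparel', 'clothes', 'outfit', 'tailored',
--         'traditional', 'designed', 'attire', 'fabric', 'woven', 'pattern', 'sewn'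
--     }
--
--     labels = []
--
--     for i, token in enumerate(tokens):
--         token_lower = token.lower()
--
--         # Check if the token or surrounding tokens suggest clothing
--         if (
--             token_lower in clothing_indicators and (  # The token itself indicates clothing
--             (i > 0 and tokens[i - 1].lower() in clothing_indicators) or  # Preceded by a clothing indicator
--             (i < len(tokens) - 1 and tokens[i + 1].lower() in clothing_indicators) or  # Followed by a clothing indicator
--             (i > 0 and tokens[i - 1].lower() in product_context) or  # Preceded by a clothing context keyword
--             (i < len(tokens) - 1 and tokens[i + 1].lower() in product_context))  # Followed by a clothing context keyword
--         ):
--             labels.append(Product_Clothing)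
--         else:
--             labels.append(ABSTAIN)  # Default to 'O' if no match is found
--
--     return labels
-- ===== SOURCE B (Python) =====
-- ABSTAIN = -1
--
-- Product_Clothing = 24
--
-- def label_sentence_Product_Clothing(tokens):
--     """Staged flag-table formulation: one pass scatters 'trigger here' marks
--     from each trigger word onto its neighbours' slots in a boolean table,
--     a second pass reads the table; no token re-checks its own neighbours."""
--     clothing_indicators = {
--         'shirt', 'jumper', 'skirt', 'trousers', 'bikini', 'sarong', 'garments', 'robe', 'turban',
--         'caps', 'jacket', 'coat', 'dress', 'pants', 'sweater', 'scarf', 'gloves', 'hat', 'suit',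
--         'tie', 'gown', 'uniform', 'tunic', 'costume', 'blouse', 'jeans', 'shorts', 'leggings',
--         'hoodie', 'socks', 'shoes', 'boots', 'sandals', 'slippers', 'swimwear', 'sheath', 'tefillin'
--     }
--     product_context = {
--         'wearing', 'dressed', 'donning', 'wore', 'fashion', 'apparel', 'clothes', 'outfit', 'tailored',
--         'traditional', 'designed', 'attire', 'fabric', 'woven', 'pattern', 'sewn'
--     }
--     trigger = clothing_indicators | product_context
--
--     n = len(tokens)
--     low = [t.lower() for t in tokens]
--
--     # pass 1: scatter flags from trigger positions to their neighbours
--     has_neighbor = [False] * n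
--     for j in range(n):
--         if low[j] in trigger:
--             if j > 0:
--                 has_neighbor[j - 1] = True
--             if j + 1 < n:
--                 has_neighbor[j + 1] = True
--
--     # pass 2: gather
--     return [Product_Clothing if low[i] in clothing_indicators and has_neighbor[i] else ABSTAIN
--             for i in range(n)]
-- ===== Notes on version B (the rewrite author's own statement) =====
-- stated objective: alternative
-- what changed: B replaces A's per-token neighbour probing by a staged two-pass algorithm: a first pass scatters marks from each trigger word into a boolean has_neighbor table at the adjacent positions, and a second pass only reads the table entry for its own position.
import Mathlib
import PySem

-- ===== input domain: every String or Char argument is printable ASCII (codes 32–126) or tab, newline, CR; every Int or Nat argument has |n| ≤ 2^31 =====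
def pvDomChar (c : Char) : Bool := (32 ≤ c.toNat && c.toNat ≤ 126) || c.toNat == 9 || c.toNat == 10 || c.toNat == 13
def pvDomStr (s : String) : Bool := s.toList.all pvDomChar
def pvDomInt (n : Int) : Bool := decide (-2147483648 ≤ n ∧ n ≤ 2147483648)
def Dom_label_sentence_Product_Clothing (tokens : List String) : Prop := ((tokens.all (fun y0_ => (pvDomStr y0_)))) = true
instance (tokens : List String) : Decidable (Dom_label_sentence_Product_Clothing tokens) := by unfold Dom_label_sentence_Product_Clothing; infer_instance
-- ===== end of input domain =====

-- B replaces A's per-token neighbour probing by a staged two-pass algorithm: a scatter pass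
-- marks the neighbours of every trigger word in a boolean table, a gather pass reads the table
-- (objective: alternative decomposition, same cost).

-- the two vocabularies (shared module constants of both ports)
def pvClothing : List String :=
  ["shirt", "jumper", "skirt", "trousers", "bikini", "sarong", "garments", "robe", "turban",
   "caps", "jacket", "coat", "dress", "pants", "sweater", "scarf", "gloves", "hat", "suit",
   "tie", "gown", "uniform", "tunic", "costume", "blouse", "jeans", "shorts", "leggings",
   "hoodie", "socks", "shoes", "boots", "sandals", "slippers", "swimwear", "sheath", "tefillin"]

def pvContext : List String :=
  ["wearing", "dressed", "donning", "wore", "fashion", "apparel", "clothes", "outfit", "tailored",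
   "traditional", "designed", "attire", "fabric", "woven", "pattern", "sewn"]

-- ===== PORT A =====
-- A's big if-condition, literally (the guarded neighbour accesses tokens[i-1]/tokens[i+1];
-- the "" default of pyGetD is never consulted because Python's `and` guards the index)
def pvCondA (tokens : List String) (i : Int) (token : String) : Bool :=
  pvClothing.contains (PySem.Str.lower token) &&
    ( (decide (0 < i) && pvClothing.contains (PySem.Str.lower (PySem.List.pyGetD tokens (i - 1) "")))
   || (decide (i < (tokens.length : Int) - 1) && pvClothing.contains (PySem.Str.lower (PySem.List.pyGetD tokens (i + 1) "")))
   || (decide (0 < i) && pvContext.contains (PySem.Str.lower (PySem.List.pyGetD tokens (i - 1) "")))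
   || (decide (i < (tokens.length : Int) - 1) && pvContext.contains (PySem.Str.lower (PySem.List.pyGetD tokens (i + 1) ""))) )

def label_sentence_Product_Clothing (tokens : List String) : List Int :=
  (PySem.List.enumerate tokens).foldl
    (fun labels p => labels ++ [if pvCondA tokens p.1 p.2 then (24 : Int) else (-1 : Int)]) []

-- ===== PORT B =====
def pvTrigger : List String := pvClothing ++ pvContext

-- the body of B's scatter loop: `if low[j] in trigger: if j > 0: …; if j+1 < n: …`
def pvStep (n : Nat) (low : List String) (f : List Bool) (j : Nat) : List Bool :=
  if pvTrigger.contains (low.getD j "") then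
    let f1 := if 0 < j then f.set (j - 1) true else f
    if j + 1 < n then f1.set (j + 1) true else f1
  else f

-- pass 1: `has_neighbor = [False]*n; for j in range(n): …`
def pvScatter (n : Nat) (low : List String) : List Bool :=
  (List.range n).foldl (pvStep n low) (List.replicate n false)

def label_sentence_Product_Clothing_alt (tokens : List String) : List Int :=
  let n := tokens.length
  let low := tokens.map PySem.Str.lower
  let flag := pvScatter n low
  (List.range n).map
    (fun i => if pvClothing.contains (low.getD i "") && flag.getD i false then (24 : Int) else (-1 : Int))

-- ===== PRECONDITION & SPEC =====
def Spec_label_sentence_Product_Clothing (tokens : List String) (out : List Int) : Prop := out = label_sentence_Product_Clothing_alt tokens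
instance (tokens : List String) (out : List Int) : Decidable (Spec_label_sentence_Product_Clothing tokens out) := by unfold Spec_label_sentence_Product_Clothing; infer_instance

-- ===== CLAIM (what is proved, stated in full; the proofs are below) =====
def Claim_equal_label_sentence_Product_Clothing : Prop := ∀ (tokens : List String), Dom_label_sentence_Product_Clothing tokens → Spec_label_sentence_Product_Clothing tokens (label_sentence_Product_Clothing tokens)

-- ===== LEMMAS AND PROOFS =====

-- boolean regrouping of A's four guarded disjuncts into two neighbour tests
lemma pvRegroup (cl a b c1 c2 c3 c4 : Bool) :
    (cl && ((a && c1) || (b && c2) || (a && c3) || (b && c4))) =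
    (cl && ((a && (c1 || c3)) || (b && (c2 || c4)))) := by
  revert cl a b c1 c2 c3 c4; decide

lemma pvStep_length (n : Nat) (low : List String) (f : List Bool) (j : Nat) :
    (pvStep n low f j).length = f.length := by
  unfold pvStep; split_ifs <;> simp

lemma pvSet_getD (f : List Bool) (k i : Nat) (hk : k < f.length) :
    (f.set k true).getD i false = (f.getD i false || decide (k = i)) := by
  by_cases e : k = i
  · subst e; simp [List.getD_eq_getElem?_getD, hk]
  · simp [List.getD_eq_getElem?_getD, e]

lemma pvStep_getD (n : Nat) (low : List String) (f : List Bool) (j i : Nat)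
    (hf : f.length = n) (hj : j < n) (hi : i < n) :
    (pvStep n low f j).getD i false =
      (f.getD i false ||
        (pvTrigger.contains (low.getD j "") && (decide (j = i + 1) || decide (j + 1 = i)))) := by
  unfold pvStep
  cases ht : pvTrigger.contains (low.getD j "") with
  | false =>
    rw [if_neg Bool.false_ne_true]
    simp only [Bool.false_and, Bool.or_false]
  | true =>
    rw [if_pos rfl]
    simp only [Bool.true_and]
    by_cases h1 : 0 < j <;> by_cases h2 : j + 1 < n
    · rw [if_pos h1, if_pos h2,
        pvSet_getD _ (j + 1) i (by rw [List.length_set]; omega),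
        pvSet_getD f (j - 1) i (by omega), Bool.or_assoc]
      congr 1
      rw [Bool.eq_iff_iff]
      simp only [Bool.or_eq_true, decide_eq_true_eq]
      omega
    · rw [if_pos h1, if_neg h2, pvSet_getD f (j - 1) i (by omega)]
      congr 1
      rw [Bool.eq_iff_iff]
      simp only [Bool.or_eq_true, decide_eq_true_eq]
      omega
    · rw [if_neg h1, if_pos h2, pvSet_getD f (j + 1) i (by omega)]
      congr 1
      rw [Bool.eq_iff_iff]
      simp only [Bool.or_eq_true, decide_eq_true_eq]
      omega
    · rw [if_neg h1, if_neg h2]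
      have : (decide (j = i + 1) || decide (j + 1 = i)) = false := by
        rw [Bool.eq_iff_iff]
        simp only [Bool.or_eq_true, decide_eq_true_eq, Bool.false_eq_true, iff_false]
        omega
      rw [this, Bool.or_false]

lemma pvScatter_fold (n : Nat) (low : List String) (js : List Nat) (i : Nat) (hi : i < n)
    (hjs : ∀ j ∈ js, j < n) :
    ∀ (f0 : List Bool), f0.length = n →
    (js.foldl (pvStep n low) f0).getD i false =
      (f0.getD i false ||
        js.any (fun j => pvTrigger.contains (low.getD j "") && (decide (j = i + 1) || decide (j + 1 = i)))) := by
  induction js with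
  | nil => intro f0 _; simp
  | cons j js ih =>
    intro f0 hf
    rw [List.foldl_cons,
        ih (fun x hx => hjs x (List.mem_cons_of_mem _ hx)) (pvStep n low f0 j)
          (by rw [pvStep_length]; exact hf),
        pvStep_getD n low f0 j i hf (hjs j (List.mem_cons_self)) hi,
        List.any_cons, Bool.or_assoc]

lemma pvScatter_getD (n : Nat) (low : List String) (i : Nat) (hi : i < n) :
    (pvScatter n low).getD i false =
      ((decide (0 < i) && pvTrigger.contains (low.getD (i - 1) "")) ||
       (decide (i + 1 < n) && pvTrigger.contains (low.getD (i + 1) ""))) := by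
  unfold pvScatter
  rw [pvScatter_fold n low (List.range n) i hi (fun j hj => List.mem_range.mp hj)
        (List.replicate n false) (by simp)]
  have hrep : (List.replicate n false).getD i false = false := by
    simp [List.getD_eq_getElem?_getD, hi]
  rw [hrep, Bool.false_or]
  rw [Bool.eq_iff_iff]
  simp only [List.any_eq_true, List.mem_range, Bool.and_eq_true, Bool.or_eq_true,
    decide_eq_true_eq]
  constructor
  · rintro ⟨j, hj, ht, h | h⟩
    · right; exact ⟨by omega, by rw [show i + 1 = j by omega]; exact ht⟩
    · left; exact ⟨by omega, by rw [show i - 1 = j by omega]; exact ht⟩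
  · rintro (⟨h0, ht⟩ | ⟨hn, ht⟩)
    · exact ⟨i - 1, by omega, ht, Or.inr (by omega)⟩
    · exact ⟨i + 1, by omega, ht, Or.inl rfl⟩

lemma pvTrigger_contains (x : String) :
    pvTrigger.contains x = (pvClothing.contains x || pvContext.contains x) := by
  simp [pvTrigger]

-- ===== VERDICT (by name: the statement is the Claim_ definition above) =====
theorem label_sentence_Product_Clothing_spec : Claim_equal_label_sentence_Product_Clothing := by
  intro tokens _
  show label_sentence_Product_Clothing tokens = label_sentence_Product_Clothing_alt tokens
  unfold label_sentence_Product_Clothing label_sentence_Product_Clothing_alt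
  rw [PySem.List.foldl_append_singleton_eq_map]
  apply List.ext_getElem
  · simp
  · intro i h1 h2
    have hi : i < tokens.length := by simpa using h1
    simp only [List.nil_append]
    rw [List.getElem_map, List.getElem_map, PySem.List.getElem_enumerate, List.getElem_range]
    have hlow : ∀ k, k < tokens.length →
        (tokens.map PySem.Str.lower).getD k "" = PySem.Str.lower (tokens.getD k "") := by
      intro k hk
      rw [List.getD_eq_getElem _ _ (by simpa using hk), List.getD_eq_getElem _ _ hk,
          List.getElem_map]
    rw [pvScatter_getD tokens.length (tokens.map PySem.Str.lower) i hi]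
    have hb : pvCondA tokens (0 + (i : Int)) tokens[i] =
        (pvClothing.contains ((tokens.map PySem.Str.lower).getD i "") &&
          ((decide (0 < i) && pvTrigger.contains ((tokens.map PySem.Str.lower).getD (i - 1) "")) ||
           (decide (i + 1 < tokens.length) &&
              pvTrigger.contains ((tokens.map PySem.Str.lower).getD (i + 1) "")))) := by
      unfold pvCondA
      rw [pvRegroup]
      congr 1
      · rw [hlow i hi, List.getD_eq_getElem _ _ hi]
      congr 1
      · -- previous-neighbour disjunct
        cases i with
        | zero => simp
        | succ j =>
          have hj : j < tokens.length := by omega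
          have hcast : (0 + ((j + 1 : Nat) : Int) - 1) = ((j : Nat) : Int) := by push_cast; ring
          rw [hcast, PySem.List.pyGetD_natCast, hlow (j + 1 - 1) (by omega),
              pvTrigger_contains]
          simp
      · -- next-neighbour disjunct
        have hcast : (0 + (i : Int) + 1) = (((i + 1 : Nat)) : Int) := by push_cast; ring
        rw [hcast, PySem.List.pyGetD_natCast]
        by_cases h : i + 1 < tokens.length
        · rw [hlow (i + 1) h, pvTrigger_contains]
          have hlt : decide ((0 : Int) + (i : Int) < (tokens.length : Int) - 1) = true := by
            simp; omega
          have hlt' : decide (i + 1 < tokens.length) = true := by simp [h]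
          rw [hlt, hlt']
        · have hge : decide ((0 : Int) + (i : Int) < (tokens.length : Int) - 1) = false := by
            simp; omega
          have hge' : decide (i + 1 < tokens.length) = false := by simp; omega
          rw [hge, hge']
          simp
    rw [hb]
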